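-- pv_equiv track=rewrite | github.com/VldChk/leetcoding | advent_of_code/day_3.py | largest_battery_part_one
-- ===== SOURCE A (Python) =====
-- def largest_battery_part_one(batteries):
--     total_count = 0
--     for battery in batteries:
--         battery_str = str(battery)
--         max_digit = int(battery_str[0])
--         max_sum = 0
--         for i in range(1, len(battery_str)):
--             current_digit = int(battery_str[i])
--             if max_digit * 10 + current_digit > max_sum:
--                 max_sum = max_digit * 10 + current_digit
--             if current_digit > max_digit:
--                 max_digit = current_digit
--         total_count += max_sum
--     return total_count
-- ===== SOURCE B (Python) =====
-- def largest_battery_part_one(batteries):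
--     total = 0
--     for battery in batteries:
--         s = str(battery)
--         total += max((int(s[j]) * 10 + int(s[i])
--                       for i in range(len(s)) for j in range(i)),
--                      default=0)
--     return total
-- ===== Notes on version B (the rewrite author's own statement) =====
-- stated objective: simpler
-- what changed: Replaced A's single-pass running-maximum state machine (tracking max_digit and max_sum) per battery by a stateless maximum over all ordered digit pairs j<i with default 0.
import Mathlib
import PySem

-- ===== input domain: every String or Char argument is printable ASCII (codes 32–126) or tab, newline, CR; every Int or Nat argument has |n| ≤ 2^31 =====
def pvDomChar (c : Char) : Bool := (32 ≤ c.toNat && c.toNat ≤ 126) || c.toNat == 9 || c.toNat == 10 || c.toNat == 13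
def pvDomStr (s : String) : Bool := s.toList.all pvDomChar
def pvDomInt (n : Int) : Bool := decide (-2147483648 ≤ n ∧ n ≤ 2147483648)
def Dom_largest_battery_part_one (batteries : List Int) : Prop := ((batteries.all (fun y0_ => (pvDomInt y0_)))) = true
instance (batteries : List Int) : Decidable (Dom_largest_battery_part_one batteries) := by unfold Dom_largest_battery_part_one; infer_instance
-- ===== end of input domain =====

-- B replaces A's running-maximum state machine per battery by a stateless max over all
-- ordered digit pairs (j < i) with default 0: simpler, no faster (proved return-value equal on Pre_).

-- int(c) for a single character: exact on '0'..'9', which is all that occurs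
-- since Pre_ restricts batteries to nonnegative ints (str(n) is then all digits).
def pvDigit (c : Char) : Int := (c.toNat : Int) - 48

-- ===== PORT A =====
-- per-battery inner loop of A: state (max_digit, max_sum), branches in source order
def pvABattery (s : List Char) : Int :=
  match s with
  | [] => 0   -- unreachable: str(n) is never empty
  | c :: rest =>
    let st := rest.foldl
      (fun (st : Int × Int) ch =>
        let current := pvDigit ch
        let ms := if st.1 * 10 + current > st.2 then st.1 * 10 + current else st.2
        let md := if current > st.1 then current else st.1
        (md, ms))
      (pvDigit c, 0)
    st.2

def largest_battery_part_one (batteries : List Int) : Int :=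
  batteries.foldl (fun total b => total + pvABattery (PySem.Int.toStr b).toList) 0

-- ===== PORT B =====
-- per-battery: max over all ordered pairs j < i (nested range loops), default 0;
-- in-range indexing s[j] ported as getD (always in range here).
def pvBBattery (s : List Char) : Int :=
  let ds := s.map pvDigit
  (List.range ds.length).foldl
    (fun acc i =>
      (List.range i).foldl
        (fun acc j => max acc (ds.getD j 0 * 10 + ds.getD i 0)) acc)
    0

def largest_battery_part_one_alt (batteries : List Int) : Int :=
  batteries.foldl (fun total b => total + pvBBattery (PySem.Int.toStr b).toList) 0

-- ===== PRECONDITION & SPEC =====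
-- Pre_ excludes negative batteries: str(b) then starts with '-' and both A and B
-- raise ValueError at int('-').
def Pre_largest_battery_part_one (batteries : List Int) : Prop :=
  ∀ b ∈ batteries, 0 ≤ b
instance (batteries : List Int) : Decidable (Pre_largest_battery_part_one batteries) := by
  unfold Pre_largest_battery_part_one; infer_instance

def pvWitness_largest_battery_part_one : List Int := [987, 5, 10, 0]

def Spec_largest_battery_part_one (batteries : List Int) (out : Int) : Prop := out = largest_battery_part_one_alt batteries
instance (batteries : List Int) (out : Int) : Decidable (Spec_largest_battery_part_one batteries out) := by unfold Spec_largest_battery_part_one; infer_instance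

-- ===== CLAIM (what is proved, stated in full; the proofs are below) =====
def Claim_equal_largest_battery_part_one : Prop := ∀ (batteries : List Int), Dom_largest_battery_part_one batteries → Pre_largest_battery_part_one batteries → Spec_largest_battery_part_one batteries (largest_battery_part_one batteries)

-- ===== LEMMAS AND PROOFS =====

-- A's inner loop with generalized state, seen on digit values
def pvGo (maxd ms : Int) : List Int → Int
  | [] => ms
  | d :: t => pvGo (max maxd d) (max ms (maxd * 10 + d)) t

lemma pv_fold_eq_go (rest : List Char) : ∀ (m s : Int),
    (rest.foldl
      (fun (st : Int × Int) ch =>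
        let current := pvDigit ch
        let ms := if st.1 * 10 + current > st.2 then st.1 * 10 + current else st.2
        let md := if current > st.1 then current else st.1
        (md, ms))
      (m, s)).2 = pvGo m s (rest.map pvDigit) := by
  induction rest with
  | nil => intro m s; simp [pvGo]
  | cons ch t ih =>
    intro m s
    simp only [List.foldl_cons, List.map_cons, pvGo]
    rw [ih]
    congr 1 <;> simp [max_def] <;> split_ifs <;> omega

lemma pvABattery_eq_go (c : Char) (rest : List Char) :
    pvABattery (c :: rest) = pvGo (pvDigit c) 0 (rest.map pvDigit) := by
  show (rest.foldl _ (pvDigit c, 0)).2 = _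
  exact pv_fold_eq_go rest (pvDigit c) 0

lemma pvGo_snoc (maxd ms d : Int) (t : List Int) :
    pvGo maxd ms (t ++ [d]) = max (pvGo maxd ms t) ((t.foldl max maxd) * 10 + d) := by
  induction t generalizing maxd ms with
  | nil => simp [pvGo]
  | cons x t ih => simp only [List.cons_append, pvGo, List.foldl_cons]; rw [ih]

lemma pv_foldl_range_getD {α : Type} (ds : List Int) (f : α → Int → α) (a0 : α) :
    (List.range ds.length).foldl (fun a j => f a (ds.getD j 0)) a0 = ds.foldl f a0 := by
  induction ds using List.reverseRecOn generalizing a0 with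
  | nil => simp
  | append_singleton t x ih =>
    rw [List.length_append, List.length_singleton, List.range_succ, List.foldl_append,
        List.foldl_append]
    have h : (List.range t.length).foldl (fun a j => f a ((t ++ [x]).getD j 0)) a0
        = (List.range t.length).foldl (fun a j => f a (t.getD j 0)) a0 := by
      apply PySem.List.foldl_congr_mem
      intro acc j hj
      rw [List.mem_range] at hj
      rw [List.getD_append _ _ _ _ hj]
    rw [h, ih]
    simp

lemma pv_foldl_maxpair (t : List Int) (d : Int) :
    ∀ (a1 m : Int),
      t.foldl (fun a x => max a (x * 10 + d)) (max a1 (m * 10 + d))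
        = max a1 ((t.foldl max m) * 10 + d) := by
  induction t with
  | nil => intro a1 m; rfl
  | cons x t ih =>
    intro a1 m
    simp only [List.foldl_cons]
    have : max (max a1 (m * 10 + d)) (x * 10 + d) = max a1 ((max m x) * 10 + d) := by
      rcases le_total m x with h | h <;> simp [max_def] <;> split_ifs <;> omega
    rw [this, ih]

lemma pvBattery_eq (c : Char) (rest : List Char) :
    pvABattery (c :: rest) = pvBBattery (c :: rest) := by
  rw [pvABattery_eq_go]
  unfold pvBBattery
  simp only [List.map_cons]
  generalize pvDigit c = m
  generalize rest.map pvDigit = t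
  induction t using List.reverseRecOn with
  | nil => simp [pvGo, List.range_succ]
  | append_singleton t d ih =>
    rw [pvGo_snoc, ih]
    rw [show (m :: (t ++ [d])).length = (m :: t).length + 1 by simp,
        List.range_succ, List.foldl_append]
    have hcongr : (List.range (m :: t).length).foldl
        (fun acc i => (List.range i).foldl
          (fun acc j => max acc ((m :: (t ++ [d])).getD j 0 * 10 + (m :: (t ++ [d])).getD i 0)) acc) 0
        = (List.range (m :: t).length).foldl
        (fun acc i => (List.range i).foldl
          (fun acc j => max acc ((m :: t).getD j 0 * 10 + (m :: t).getD i 0)) acc) 0 := by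
      apply PySem.List.foldl_congr_mem
      intro acc i hi
      rw [List.mem_range] at hi
      apply PySem.List.foldl_congr_mem
      intro acc2 j hj
      rw [List.mem_range] at hj
      have hji : j < (m :: t).length := lt_trans hj hi
      rw [show (m :: (t ++ [d])) = (m :: t) ++ [d] by simp,
          List.getD_append _ _ _ _ hji, List.getD_append _ _ _ _ hi]
    rw [hcongr]
    simp only [List.foldl_cons, List.foldl_nil]
    have hstep : ∀ (a0 : Int), (List.range (m :: t).length).foldl
        (fun acc j => max acc ((m :: (t ++ [d])).getD j 0 * 10 + (m :: (t ++ [d])).getD (m :: t).length 0)) a0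
        = max a0 ((t.foldl max m) * 10 + d) := by
      intro a0
      have hd : (m :: (t ++ [d])).getD (m :: t).length 0 = d := by
        rw [show (m :: (t ++ [d])) = (m :: t) ++ [d] by simp]
        simp
      rw [hd]
      have h2 : (List.range (m :: t).length).foldl
          (fun acc j => max acc ((m :: (t ++ [d])).getD j 0 * 10 + d)) a0
          = (List.range (m :: t).length).foldl
          (fun acc j => max acc ((m :: t).getD j 0 * 10 + d)) a0 := by
        apply PySem.List.foldl_congr_mem
        intro acc j hj
        rw [List.mem_range] at hj
        rw [show (m :: (t ++ [d])) = (m :: t) ++ [d] by simp, List.getD_append _ _ _ _ hj]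
      rw [h2, pv_foldl_range_getD (m :: t) (fun a x => max a (x * 10 + d)) a0]
      simp only [List.foldl_cons]
      exact pv_foldl_maxpair t d a0 m
    rw [hstep]

lemma pvABattery_eq_B (s : List Char) : pvABattery s = pvBBattery s := by
  cases s with
  | nil => rfl
  | cons c rest => exact pvBattery_eq c rest

-- ===== VERDICT (by name: the statement is the Claim_ definition above) =====
theorem largest_battery_part_one_spec : Claim_equal_largest_battery_part_one := by
  intro batteries _ _
  unfold Spec_largest_battery_part_one largest_battery_part_one largest_battery_part_one_alt
  apply PySem.List.foldl_congr_mem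
  intro acc b _
  rw [pvABattery_eq_B]
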